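-- pv_equiv track=rewrite | github.com/AudriusDai/adventofcode | day_3/task_1/main.py | get_least_repeated_bits
-- ===== SOURCE A (Python) =====
-- from typing import List
--
-- def get_least_repeated_bits(data: List[str]) -> str:
--     final = ''
--     for i in range(len(data[0])):
--         zeroes = 0
--         ones = 0
--         for j in range(len(data)):
--             if int(data[j][i]) == 0:
--                 zeroes += 1
--             else:
--                 ones += 1
--
--         if ones >= zeroes:
--             final += '0'
--         else:
--             final += '1'
--     return final
-- ===== SOURCE B (Python) =====
-- def get_least_repeated_bits(data):
--     n = len(data)
--     width = len(data[0])
--     counts = [0] * width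
--     for row in data:
--         counts = [cnt + (int(c) != 0) for cnt, c in zip(counts, row)]
--     return ''.join('0' if 2 * cnt >= n else '1' for cnt in counts)
-- ===== Notes on version B (the rewrite author's own statement) =====
-- stated objective: alternative
-- what changed: A counts zeroes and ones column by column with nested loops (outer over columns, inner re-scanning all rows per column); B makes a single row-major pass that updates a per-column counts table via zip, then a separate emit pass deciding '0' iff 2*count >= len(data).
import Mathlib
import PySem

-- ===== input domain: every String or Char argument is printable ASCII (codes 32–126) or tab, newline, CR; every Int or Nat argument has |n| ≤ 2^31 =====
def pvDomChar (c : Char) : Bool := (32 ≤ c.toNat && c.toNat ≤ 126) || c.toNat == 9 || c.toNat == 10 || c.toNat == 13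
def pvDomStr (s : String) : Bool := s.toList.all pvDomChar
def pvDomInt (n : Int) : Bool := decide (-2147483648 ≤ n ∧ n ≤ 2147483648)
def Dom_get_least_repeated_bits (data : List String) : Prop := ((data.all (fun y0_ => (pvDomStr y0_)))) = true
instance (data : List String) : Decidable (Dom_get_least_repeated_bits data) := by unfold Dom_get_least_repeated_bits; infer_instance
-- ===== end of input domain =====

-- B replaces A's column-major nested loops by a single row-major pass building a per-column counts table, then a separate emit pass (objective: alternative decomposition, same cost).

-- ===== PORT A =====
-- A: for each column i, count zeroes/ones over all rows, append '0' iff ones >= zeroes.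
def get_least_repeated_bits (data : List String) : String :=
  String.mk ((PySem.List.pyRange 0 ((PySem.List.pyGetD data 0 "").toList.length : Int) 1).foldl
    (fun final i =>
      let zo := (PySem.List.pyRange 0 (data.length : Int) 1).foldl
        (fun (zo : Int × Int) j =>
          if (PySem.Int.ofChars? [PySem.List.pyGetD (PySem.List.pyGetD data j "").toList i ' ']).getD 0 = 0
          then (zo.1 + 1, zo.2) else (zo.1, zo.2 + 1)) (0, 0)
      if zo.2 ≥ zo.1 then final ++ ['0'] else final ++ ['1']) [])

-- ===== PORT B =====
-- B: one pass over the rows updates counts[i] (+1 when the i-th char is a nonzero digit), then one emit pass.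
def get_least_repeated_bits_alt (data : List String) : String :=
  let n := data.length
  let width := (PySem.List.pyGetD data 0 "").toList.length
  let counts := data.foldl
    (fun (counts : List Int) row =>
      (counts.zip row.toList).map
        (fun p => p.1 + (if (PySem.Int.ofChars? [p.2]).getD 0 ≠ 0 then 1 else 0)))
    (List.replicate width (0 : Int))
  String.mk (counts.map (fun cnt => if 2 * cnt ≥ (n : Int) then '0' else '1'))

-- ===== PRECONDITION & SPEC =====
-- Pre_ excludes exactly the inputs where Python A raises: empty data (IndexError on data[0]),
-- a row shorter than data[0] (IndexError on data[j][i]), or a character that int() rejects in the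
-- first len(data[0]) characters of some row (ValueError).
def Pre_get_least_repeated_bits (data : List String) : Prop :=
  data ≠ [] ∧ data.all (fun row =>
    decide ((PySem.List.pyGetD data 0 "").toList.length ≤ row.toList.length) &&
    (row.toList.take (PySem.List.pyGetD data 0 "").toList.length).all
      (fun c => (PySem.Int.ofChars? [c]).isSome)) = true
instance (data : List String) : Decidable (Pre_get_least_repeated_bits data) := by
  unfold Pre_get_least_repeated_bits; infer_instance
def pvWitness_get_least_repeated_bits : List String := ["0110", "1000", "1011"]
def Spec_get_least_repeated_bits (data : List String) (out : String) : Prop := out = get_least_repeated_bits_alt data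
instance (data : List String) (out : String) : Decidable (Spec_get_least_repeated_bits data out) := by unfold Spec_get_least_repeated_bits; infer_instance

-- ===== CLAIM (what is proved, stated in full; the proofs are below) =====
def Claim_equal_get_least_repeated_bits : Prop := ∀ (data : List String), Dom_get_least_repeated_bits data → Pre_get_least_repeated_bits data → Spec_get_least_repeated_bits data (get_least_repeated_bits data)

-- ===== LEMMAS AND PROOFS =====

-- whether the i-th char of a row counts as a "one" (int value nonzero)
def colOne (i : Nat) (cs : List Char) : Bool :=
  !((PySem.Int.ofChars? [cs.getD i ' ']).getD 0 == 0)

theorem pairCount {α : Type} (P : α → Prop) [DecidablePred P] (l : List α) (a b : Int) :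
    l.foldl (fun (zo : Int × Int) x => if P x then (zo.1 + 1, zo.2) else (zo.1, zo.2 + 1)) (a, b)
    = (a + l.countP (fun x => decide (P x)), b + l.countP (fun x => !decide (P x))) := by
  induction l generalizing a b with
  | nil => simp
  | cons x t ih => by_cases h : P x <;> simp [h, ih] <;> ring

theorem countP_split {α : Type} (p : α → Bool) (l : List α) :
    l.countP p + l.countP (fun a => !p a) = l.length := by
  induction l with
  | nil => simp
  | cons a t ih => by_cases h : p a <;> simp [h] <;> omega

theorem map_getD_range {α : Type} (l : List α) (d : α) :
    (List.range l.length).map (fun k => l.getD k d) = l := by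
  apply List.ext_getElem
  · simp
  · intro i h1 h2
    simp only [List.getElem_map, List.getElem_range]
    rw [List.getD_eq_getElem?_getD, List.getElem?_eq_getElem h2]; rfl

-- A's inner column count expressed as a row count
theorem colCount (data : List String) (k : Nat) (p : Char → Bool) :
    (PySem.List.pyRange 0 (data.length : Int) 1).countP
      (fun j => p (PySem.List.pyGetD (PySem.List.pyGetD data j "").toList ((k : Nat) : Int) ' '))
    = data.countP (fun row => p (row.toList.getD k ' ')) := by
  rw [PySem.List.pyRange_zero_natCast, List.countP_map]
  conv_rhs => rw [← map_getD_range data "", List.countP_map]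
  apply List.countP_congr
  intro x hx
  simp [Function.comp, PySem.List.pyGetD_natCast]

-- B's per-row zip step updates every column slot once
theorem stepRow (counts : List Int) (cs : List Char) (h : counts.length ≤ cs.length) :
    (counts.zip cs).map (fun p => p.1 + (if (PySem.Int.ofChars? [p.2]).getD 0 ≠ 0 then (1:Int) else 0))
    = (List.range counts.length).map (fun i => counts.getD i 0 +
        (if colOne i cs then (1:Int) else 0)) := by
  apply List.ext_getElem
  · simp; omega
  · intro i h1 h2
    simp only [List.getElem_map, List.getElem_range, List.getElem_zip]
    have hi : i < counts.length := by simp at h1; omega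
    have hic : i < cs.length := by omega
    simp [colOne, List.getD_eq_getElem?_getD, List.getElem?_eq_getElem hic,
          List.getElem?_eq_getElem hi]

-- B's fold over rows computes the per-column one-counts
theorem Bfold (w : Nat) (data : List String) (counts : List Int)
    (hlen : counts.length = w) (hrows : ∀ row ∈ data, w ≤ row.toList.length) :
    data.foldl (fun (counts : List Int) row =>
        (counts.zip row.toList).map
          (fun p => p.1 + (if (PySem.Int.ofChars? [p.2]).getD 0 ≠ 0 then (1:Int) else 0))) counts
    = (List.range w).map (fun i => counts.getD i 0 + (data.countP (fun row => colOne i row.toList) : Int)) := by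
  induction data generalizing counts with
  | nil =>
    simp only [List.foldl_nil, List.countP_nil]
    subst hlen
    conv_lhs => rw [← map_getD_range counts (0:Int)]
    simp
  | cons row t ih =>
    simp only [List.foldl_cons]
    rw [stepRow counts row.toList (by rw [hlen]; exact hrows row (by simp))]
    rw [hlen]
    rw [ih _ (by simp) (fun r hr => hrows r (by simp [hr]))]
    apply List.map_congr_left
    intro i hi
    simp at hi
    rw [List.getD_eq_getElem?_getD, List.getElem?_map, List.getElem?_range hi]
    simp only [List.countP_cons, Option.map_some, Option.getD_some]
    by_cases h : colOne i row.toList <;> simp [h] <;> ring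

theorem main_eq (data : List String)
    (hrows : ∀ row ∈ data, (PySem.List.pyGetD data 0 "").toList.length ≤ row.toList.length) :
    get_least_repeated_bits data = get_least_repeated_bits_alt data := by
  unfold get_least_repeated_bits get_least_repeated_bits_alt
  simp only []
  rw [Bfold _ data _ (by simp) hrows]
  rw [PySem.List.pyRange_zero_natCast (PySem.List.pyGetD data 0 "").toList.length,
      List.foldl_map, List.map_map]
  congr 1
  rw [PySem.List.foldl_congr_mem _ _
      (fun (final : List Char) (kk : Nat) => final ++
        [((fun cnt => if 2 * cnt ≥ (data.length : Int) then '0' else '1') ∘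
          (fun i => (List.replicate (PySem.List.pyGetD data 0 "").toList.length (0:Int)).getD i 0
                    + (data.countP (fun row => colOne i row.toList) : Int))) kk]) _ ?_,
      PySem.List.foldl_append_singleton_eq_map]
  · simp
  · intro acc kk hkk
    simp only []
    rw [pairCount (fun j => (PySem.Int.ofChars? [PySem.List.pyGetD (PySem.List.pyGetD data j "").toList ((kk:Nat):Int) ' ']).getD 0 = 0)]
    have h0 := colCount data kk (fun c => decide ((PySem.Int.ofChars? [c]).getD 0 = 0))
    have h1 := colCount data kk (fun c => !decide ((PySem.Int.ofChars? [c]).getD 0 = 0))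
    simp only [] at h0 h1
    rw [h0, h1]
    have hsplit := countP_split (fun row => decide ((PySem.Int.ofChars? [row.toList.getD kk ' ']).getD 0 = 0)) data
    have hcol : data.countP (fun row => colOne kk row.toList)
        = data.countP (fun row => !decide ((PySem.Int.ofChars? [row.toList.getD kk ' ']).getD 0 = 0)) := by
      apply List.countP_congr; intro x hx; simp [colOne]
    rw [Function.comp_apply, hcol]
    set z := data.countP (fun row => decide ((PySem.Int.ofChars? [row.toList.getD kk ' ']).getD 0 = 0))
    set o := data.countP (fun row => !decide ((PySem.Int.ofChars? [row.toList.getD kk ' ']).getD 0 = 0))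
    have hr : (List.replicate (PySem.List.pyGetD data 0 "").toList.length (0:Int)).getD kk 0 = 0 := by
      simp only [List.getD_eq_getElem?_getD, List.getElem?_replicate]
      split <;> rfl
    have hiff : ((0:Int) + o ≥ 0 + z) ↔ (2 * ((List.replicate (PySem.List.pyGetD data 0 "").toList.length (0:Int)).getD kk 0 + (o:Int)) ≥ (data.length:Int)) := by
      rw [hr]; omega
    split_ifs with ha hb hb
    · rfl
    · exact absurd (hiff.mp ha) hb
    · exact absurd (hiff.mpr hb) ha
    · rfl

-- ===== VERDICT (by name: the statement is the Claim_ definition above) =====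
theorem get_least_repeated_bits_spec : Claim_equal_get_least_repeated_bits := by
  intro data _ hpre
  unfold Spec_get_least_repeated_bits
  apply main_eq data
  intro row hr
  have h := (List.all_eq_true.mp hpre.2) row hr
  exact of_decide_eq_true (Bool.and_elim_left h)
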